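-- pv_equiv track=rewrite | github.com/ruapotato/The-Legend-of-Tux | Music buildout/extract_melody.py | filter_ostinato
-- ===== SOURCE A (Python) =====
-- def filter_ostinato(seq):
--     # Drop runs of G4 that appear in the rapid ostinato pattern.
--     # The ostinato G4s come in clusters with very short gaps (<= 96 ticks ~ 16th).
--     # Real melodic G4 in the theme is preceded/followed by other pitches with
--     # more typical gaps. Heuristic: drop a G4 if the previous AND next notes
--     # within 96 ticks are also G4 (forming a dense G4 cluster).
--     out = []
--     for i, (t, n) in enumerate(seq):
--         if n != 67:
--             out.append((t, n))
--             continue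
--         # G4 — check if it's part of a cluster of G4s
--         prev_g = i > 0 and seq[i-1][1] == 67 and (t - seq[i-1][0]) <= 192
--         next_g = i < len(seq)-1 and seq[i+1][1] == 67 and (seq[i+1][0] - t) <= 192
--         if prev_g or next_g:
--             continue  # ostinato
--         out.append((t, n))
--     return out
-- ===== SOURCE B (Python) =====
-- def filter_ostinato(seq):
--     # Edge-marking pass: record every index that participates in a close
--     # adjacent G4 pair, then filter in one sweep.
--     drop = set()
--     for i in range(len(seq) - 1):
--         if seq[i][1] == 67 and seq[i + 1][1] == 67 and seq[i + 1][0] - seq[i][0] <= 192: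
--             drop.add(i)
--             drop.add(i + 1)
--     return [x for i, x in enumerate(seq) if i not in drop]
-- ===== Notes on version B (the rewrite author's own statement) =====
-- stated objective: alternative
-- what changed: Replaces A's per-element backward/forward neighbor inspection with an edge-marking pass over consecutive pairs that builds a drop set, followed by a single filter pass that emits the unmarked elements.
import Mathlib
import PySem

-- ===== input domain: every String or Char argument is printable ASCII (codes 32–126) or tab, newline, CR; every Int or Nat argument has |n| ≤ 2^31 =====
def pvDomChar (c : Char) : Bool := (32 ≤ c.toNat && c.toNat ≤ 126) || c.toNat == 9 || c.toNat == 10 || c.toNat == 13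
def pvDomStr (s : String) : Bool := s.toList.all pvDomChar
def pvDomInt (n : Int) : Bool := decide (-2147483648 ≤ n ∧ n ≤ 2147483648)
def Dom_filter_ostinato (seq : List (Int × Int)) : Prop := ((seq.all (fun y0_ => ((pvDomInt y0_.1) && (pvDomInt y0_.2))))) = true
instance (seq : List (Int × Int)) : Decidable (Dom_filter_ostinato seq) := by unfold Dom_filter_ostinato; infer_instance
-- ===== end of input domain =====

-- B replaces A's per-element backward/forward neighbour inspection by an edge-marking
-- pass over consecutive pairs (building a drop set) followed by one filtering sweep;
-- same O(n) cost, alternative decomposition.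

-- ===== PORT A =====
def filter_ostinato (seq : List (Int × Int)) : List (Int × Int) :=
  (PySem.List.enumerate seq).foldl (fun out p =>
    let i := p.1
    let t := p.2.1
    let n := p.2.2
    if n ≠ 67 then
      out ++ [(t, n)]
    else
      let prev_g := decide (i > 0) && ((PySem.List.pyGetD seq (i - 1) (0, 0)).2 == 67)
                      && decide (t - (PySem.List.pyGetD seq (i - 1) (0, 0)).1 ≤ 192)
      let next_g := decide (i < (seq.length : Int) - 1) && ((PySem.List.pyGetD seq (i + 1) (0, 0)).2 == 67)
                      && decide ((PySem.List.pyGetD seq (i + 1) (0, 0)).1 - t ≤ 192)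
      if prev_g || next_g then out else out ++ [(t, n)]) []

-- ===== PORT B =====
def filter_ostinato_alt (seq : List (Int × Int)) : List (Int × Int) :=
  let drop : PySem.Set Int :=
    (PySem.List.pyRange 0 ((seq.length : Int) - 1)).foldl (fun d i =>
      if ((PySem.List.pyGetD seq i (0, 0)).2 == 67) && ((PySem.List.pyGetD seq (i + 1) (0, 0)).2 == 67)
           && decide ((PySem.List.pyGetD seq (i + 1) (0, 0)).1 - (PySem.List.pyGetD seq i (0, 0)).1 ≤ 192)
      then (d.add i).add (i + 1) else d) PySem.Set.empty
  (PySem.List.enumerate seq).filterMap (fun p => if drop.contains p.1 then none else some p.2)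

-- ===== PRECONDITION & SPEC =====
def Spec_filter_ostinato (seq : List (Int × Int)) (out : List (Int × Int)) : Prop := out = filter_ostinato_alt seq
instance (seq : List (Int × Int)) (out : List (Int × Int)) : Decidable (Spec_filter_ostinato seq out) := by unfold Spec_filter_ostinato; infer_instance

-- ===== CLAIM (what is proved, stated in full; the proofs are below) =====
def Claim_equal_filter_ostinato : Prop := ∀ (seq : List (Int × Int)), Dom_filter_ostinato seq → Spec_filter_ostinato seq (filter_ostinato seq)

-- ===== LEMMAS AND PROOFS =====

-- the close-adjacent-G4-pair test of B's marking pass, as a named predicate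
def pvClose (seq : List (Int × Int)) (i : Int) : Bool :=
  ((PySem.List.pyGetD seq i (0, 0)).2 == 67) && ((PySem.List.pyGetD seq (i + 1) (0, 0)).2 == 67)
    && decide ((PySem.List.pyGetD seq (i + 1) (0, 0)).1 - (PySem.List.pyGetD seq i (0, 0)).1 ≤ 192)

-- A's keep-decision, as a named predicate over an enumerated entry
def pvKeepA (seq : List (Int × Int)) (p : Int × (Int × Int)) : Bool :=
  if p.2.2 ≠ 67 then true
  else !((decide (p.1 > 0) && ((PySem.List.pyGetD seq (p.1 - 1) (0, 0)).2 == 67)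
            && decide (p.2.1 - (PySem.List.pyGetD seq (p.1 - 1) (0, 0)).1 ≤ 192))
         || (decide (p.1 < (seq.length : Int) - 1) && ((PySem.List.pyGetD seq (p.1 + 1) (0, 0)).2 == 67)
            && decide ((PySem.List.pyGetD seq (p.1 + 1) (0, 0)).1 - p.2.1 ≤ 192)))

def pvDrop (seq : List (Int × Int)) : PySem.Set Int :=
  (PySem.List.pyRange 0 ((seq.length : Int) - 1)).foldl (fun d i =>
    if pvClose seq i then (d.add i).add (i + 1) else d) PySem.Set.empty

lemma pvDrop_fold_mem (seq : List (Int × Int)) (m : Nat) (x : Int) :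
    x ∈ ((List.range m).map (fun k : Nat => (k : Int))).foldl
        (fun d i => if pvClose seq i then (d.add i).add (i + 1) else d) PySem.Set.empty
      ↔ ∃ k : Nat, k < m ∧ pvClose seq k ∧ (x = k ∨ x = k + 1) := by
  induction m with
  | zero => simp [PySem.Set.empty]
  | succ m ih =>
      rw [List.range_succ, List.map_append, List.foldl_append]
      simp only [List.map_cons, List.map_nil, List.foldl_cons, List.foldl_nil]
      by_cases h : pvClose seq (m : Int)
      · simp only [h, if_pos]
        rw [PySem.Set.mem_add, PySem.Set.mem_add, ih]
        constructor
        · rintro ((⟨k, hk, hc, hx⟩ | hx) | hx)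
          · exact ⟨k, by omega, hc, hx⟩
          · exact ⟨m, by omega, h, Or.inl hx⟩
          · exact ⟨m, by omega, h, Or.inr hx⟩
        · rintro ⟨k, hk, hc, hx⟩
          by_cases hkm : k < m
          · exact Or.inl (Or.inl ⟨k, hkm, hc, hx⟩)
          · have : k = m := by omega
            subst this
            rcases hx with hx | hx
            · exact Or.inl (Or.inr hx)
            · exact Or.inr hx
      · rw [if_neg h, ih]
        constructor
        · rintro ⟨k, hk, hc, hx⟩; exact ⟨k, by omega, hc, hx⟩
        · rintro ⟨k, hk, hc, hx⟩
          refine ⟨k, ?_, hc, hx⟩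
          by_cases hkm : k < m
          · exact hkm
          · have : k = m := by omega
            subst this; exact absurd hc h

lemma pvDrop_mem (seq : List (Int × Int)) (x : Int) :
    x ∈ pvDrop seq ↔ ∃ k : Nat, k < seq.length - 1 ∧ pvClose seq k ∧ (x = k ∨ x = k + 1) := by
  unfold pvDrop
  rcases Nat.eq_zero_or_pos seq.length with h0 | h0
  · have : ((seq.length : Int) - 1) = -1 := by omega
    rw [this]
    simp [PySem.List.pyRange, PySem.Set.empty, h0]
  · have : ((seq.length : Int) - 1) = ((seq.length - 1 : Nat) : Int) := by omega
    rw [this, PySem.List.pyRange_zero_natCast]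
    exact pvDrop_fold_mem seq (seq.length - 1) x

lemma pvFilterMap_if {α β : Type} (c : α → Bool) (f : α → β) (l : List α) :
    l.filterMap (fun x => if c x then none else some (f x))
      = (l.filter (fun x => !c x)).map f := by
  induction l with
  | nil => rfl
  | cons a l ih =>
      by_cases h : c a <;> simp [h, ih]

lemma pvGet (seq : List (Int × Int)) (j : Nat) (hj : j < seq.length) :
    PySem.List.pyGetD seq ((j : Int)) (0, 0) = seq[j] := by
  rw [PySem.List.pyGetD_natCast]
  exact List.getD_eq_getElem seq (0, 0) hj

lemma pvClose_iff (seq : List (Int × Int)) (j : Nat) (hj : j + 1 < seq.length) :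
    pvClose seq (j : Int) = true ↔
      seq[j].2 = 67 ∧ seq[j+1].2 = 67 ∧ seq[j+1].1 - seq[j].1 ≤ 192 := by
  have h2 : ((j : Int) + 1) = ((j + 1 : Nat) : Int) := by push_cast; ring
  simp only [pvClose, h2, pvGet seq j (by omega), pvGet seq (j+1) hj,
    Bool.and_eq_true, beq_iff_eq, decide_eq_true_eq]
  tauto

-- the pointwise heart: A keeps index k iff B never marked it
lemma pvKeep_iff_not_drop (seq : List (Int × Int)) (k : Nat) (hk : k < seq.length) :
    pvKeepA seq ((k : Int), seq[k]) = !((pvDrop seq).contains (k : Int)) := by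
  have hmem : (pvDrop seq).contains (k : Int) = true ↔ (k : Int) ∈ pvDrop seq := by
    simp [PySem.Set.contains]
  have hiff : pvKeepA seq ((k : Int), seq[k]) = true ↔ ¬ ((k : Int) ∈ pvDrop seq) := by
    rw [pvDrop_mem]
    by_cases hn : seq[k].2 = 67
    · -- A reaches the cluster test
      have hA : pvKeepA seq ((k : Int), seq[k]) = true ↔
          ¬ (((0 : Int) < (k : Int) ∧ (PySem.List.pyGetD seq ((k : Int) - 1) (0, 0)).2 = 67 ∧
               seq[k].1 - (PySem.List.pyGetD seq ((k : Int) - 1) (0, 0)).1 ≤ 192) ∨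
             ((k : Int) < (seq.length : Int) - 1 ∧ (PySem.List.pyGetD seq ((k : Int) + 1) (0, 0)).2 = 67 ∧
               (PySem.List.pyGetD seq ((k : Int) + 1) (0, 0)).1 - seq[k].1 ≤ 192)) := by
        simp only [pvKeepA, hn, ne_eq, not_true_eq_false, if_false, Bool.not_eq_true',
          Bool.or_eq_false_iff, Bool.and_eq_false_iff, gt_iff_lt, decide_eq_false_iff_not,
          beq_eq_false_iff_ne, not_or]
        constructor
        · rintro ⟨h1, h2⟩
          constructor
          · rintro ⟨ha, hb, hc⟩
            rcases h1 with (h | h) | h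
            · exact h ha
            · exact h hb
            · exact absurd hc (by simpa using h)
          · rintro ⟨ha, hb, hc⟩
            rcases h2 with (h | h) | h
            · exact h ha
            · exact h hb
            · exact absurd hc (by simpa using h)
        · rintro ⟨h1, h2⟩
          constructor
          · by_cases ha : (0 : Int) < (k : Int)
            · by_cases hb : (PySem.List.pyGetD seq ((k : Int) - 1) (0, 0)).2 = 67
              · refine Or.inr ?_
                simp only [not_le]
                by_contra hc
                simp only [not_lt] at hc
                exact h1 ⟨ha, hb, hc⟩
              · exact Or.inl (Or.inr hb)
            · exact Or.inl (Or.inl ha)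
          · by_cases ha : (k : Int) < (seq.length : Int) - 1
            · by_cases hb : (PySem.List.pyGetD seq ((k : Int) + 1) (0, 0)).2 = 67
              · refine Or.inr ?_
                simp only [not_le]
                by_contra hc
                simp only [not_lt] at hc
                exact h2 ⟨ha, hb, hc⟩
              · exact Or.inl (Or.inr hb)
            · exact Or.inl (Or.inl ha)
      rw [hA]
      constructor
      · -- kept by A ⇒ no marking pair contains k
        rintro hno ⟨j, hj, hc, hx⟩
        rw [pvClose_iff seq j (by omega)] at hc
        obtain ⟨c1, c2, c3⟩ := hc
        rcases hx with hx | hx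
        · -- k = j : the next-neighbour test would have fired
          have hkj : k = j := by exact_mod_cast hx
          subst hkj
          have h2' : ((k : Int) + 1) = ((k + 1 : Nat) : Int) := by push_cast; ring
          refine hno (Or.inr ⟨by omega, ?_, ?_⟩)
          · rw [h2', pvGet seq (k+1) (by omega)]; exact c2
          · rw [h2', pvGet seq (k+1) (by omega)]; exact c3
        · -- k = j + 1 : the previous-neighbour test would have fired
          have hkj : k = j + 1 := by exact_mod_cast hx
          subst hkj
          have h1' : (((j + 1 : Nat) : Int) - 1) = ((j : Nat) : Int) := by push_cast; ring
          refine hno (Or.inl ⟨by omega, ?_, ?_⟩)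
          · rw [h1', pvGet seq j (by omega)]; exact c1
          · rw [h1', pvGet seq j (by omega)]; exact c3
      · -- no marking pair contains k ⇒ kept by A
        intro hnomem
        rintro (⟨ha, hb, hc⟩ | ⟨ha, hb, hc⟩)
        · -- prev_g fired : pair (k-1, k) is close
          have hk1 : 1 ≤ k := by omega
          have h1' : ((k : Int) - 1) = ((k - 1 : Nat) : Int) := by omega
          rw [h1', pvGet seq (k-1) (by omega)] at hb hc
          refine hnomem ⟨k - 1, by omega, ?_, Or.inr (by omega)⟩
          have e1 : ((k - 1 : Nat) : Int) + 1 = (k : Int) := by omega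
          simp only [pvClose, e1, pvGet seq (k-1) (by omega), pvGet seq k hk,
            Bool.and_eq_true, beq_iff_eq, decide_eq_true_eq]
          exact ⟨⟨hb, hn⟩, hc⟩
        · -- next_g fired : pair (k, k+1) is close
          have hklt : k + 1 < seq.length := by omega
          have h2' : ((k : Int) + 1) = ((k + 1 : Nat) : Int) := by push_cast; ring
          rw [h2', pvGet seq (k+1) hklt] at hb hc
          refine hnomem ⟨k, by omega, ?_, Or.inl rfl⟩
          rw [pvClose_iff seq k hklt]
          exact ⟨hn, hb, hc⟩
    · -- a non-G4 note : A keeps it, and B never marks it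
      have hA : pvKeepA seq ((k : Int), seq[k]) = true := by
        simp [pvKeepA, hn]
      rw [hA]
      simp only [true_iff]
      rintro ⟨j, hj, hc, hx⟩
      rw [pvClose_iff seq j (by omega)] at hc
      rcases hx with hx | hx
      · have : k = j := by exact_mod_cast hx
        exact hn (this ▸ hc.1)
      · have : k = j + 1 := by exact_mod_cast hx
        exact hn (this ▸ hc.2.1)
  cases hc : (pvDrop seq).contains (k : Int)
  · have hnm : (k : Int) ∉ pvDrop seq := fun h => by rw [hmem.mpr h] at hc; cases hc
    simp [hiff.mpr hnm]
  · have hm : (k : Int) ∈ pvDrop seq := hmem.mp hc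
    have hne : pvKeepA seq ((k : Int), seq[k]) ≠ true := fun h => (hiff.mp h) hm
    simp only [Bool.not_eq_true] at hne
    simp [hne]

-- A's foldl, rewritten in append-if shape
lemma pvFoldl_shape {α β : Type} (f : List β → α → List β) (q : α → Bool) (g : α → β)
    (h : ∀ out p, f out p = if q p then out ++ [g p] else out) (l : List α) :
    l.foldl f [] = (l.filter q).map g := by
  have hf : f = fun out p => if q p then out ++ [g p] else out :=
    funext fun o => funext fun p => h o p
  rw [hf, PySem.List.foldl_append_if q g l []]
  simp

theorem filter_ostinato_spec : Claim_equal_filter_ostinato := by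
  intro seq _
  unfold Spec_filter_ostinato
  have hA : filter_ostinato seq
      = ((PySem.List.enumerate seq).filter (pvKeepA seq)).map (fun p => p.2) := by
    unfold filter_ostinato
    apply pvFoldl_shape
    intro out p
    obtain ⟨i, t, n⟩ := p
    simp only [pvKeepA]
    by_cases hn : n = 67
    · simp only [hn, ne_eq, not_true_eq_false, if_false]
      cases hpq : (decide ((0:Int) < i) && ((PySem.List.pyGetD seq (i - 1) (0, 0)).2 == 67)
            && decide (t - (PySem.List.pyGetD seq (i - 1) (0, 0)).1 ≤ 192)
          || (decide (i < (seq.length : Int) - 1) && ((PySem.List.pyGetD seq (i + 1) (0, 0)).2 == 67)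
            && decide ((PySem.List.pyGetD seq (i + 1) (0, 0)).1 - t ≤ 192))) <;>
        simp_all
    · simp [hn]
  have hB : filter_ostinato_alt seq
      = (PySem.List.enumerate seq).filterMap
          (fun p => if (pvDrop seq).contains p.1 then none else some p.2) := rfl
  rw [hA, hB]
  refine Eq.trans ?_ (pvFilterMap_if (fun p => (pvDrop seq).contains p.1)
    (fun p : Int × (Int × Int) => p.2) (PySem.List.enumerate seq)).symm
  congr 1
  apply List.filter_congr
  intro p hp
  rw [PySem.List.mem_enumerate_iff] at hp
  obtain ⟨k, hk, rfl⟩ := hp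
  simpa using pvKeep_iff_not_drop seq k hk
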